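-- pv_equiv track=rewrite | github.com/dynamite-123/cses-solutions | introductory-problems/04_increasing_array.py | solve
-- ===== SOURCE A (Python) =====
-- def solve(nums: list) -> int:
--     N = len(nums)
--     res = 0
--     for i in range(1, N):
--         if nums[i] < nums[i - 1]:
--             res += nums[i - 1] - nums[i]
--             nums[i] = nums[i - 1]
--     return res
-- ===== SOURCE B (Python) =====
-- def solve(nums: list) -> int:
--     # Divide and conquer: go(m, xs) returns (moves needed in xs given prior running
--     # maximum m, running maximum after xs). Return value only; does not mutate nums.
--     def go(m, xs):
--         if not xs:
--             return 0, m
--         if len(xs) == 1: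
--             x = xs[0]
--             return (m - x, m) if m > x else (0, x)
--         mid = len(xs) // 2
--         c1, m1 = go(m, xs[:mid])
--         c2, m2 = go(m1, xs[mid:])
--         return c1 + c2, m2
--     if not nums:
--         return 0
--     return go(nums[0], nums[1:])[0]
-- ===== Notes on version B (the rewrite author's own statement) =====
-- stated objective: alternative
-- what changed: B replaces A's left-to-right index loop by a divide-and-conquer recursion: it splits the list in halves, computes (moves, running-maximum) for each half and combines them, instead of scanning with a per-index conditional; B does not mutate nums (A overwrites it with its prefix maxima), the equivalence is about the return value.
import Mathlib
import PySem

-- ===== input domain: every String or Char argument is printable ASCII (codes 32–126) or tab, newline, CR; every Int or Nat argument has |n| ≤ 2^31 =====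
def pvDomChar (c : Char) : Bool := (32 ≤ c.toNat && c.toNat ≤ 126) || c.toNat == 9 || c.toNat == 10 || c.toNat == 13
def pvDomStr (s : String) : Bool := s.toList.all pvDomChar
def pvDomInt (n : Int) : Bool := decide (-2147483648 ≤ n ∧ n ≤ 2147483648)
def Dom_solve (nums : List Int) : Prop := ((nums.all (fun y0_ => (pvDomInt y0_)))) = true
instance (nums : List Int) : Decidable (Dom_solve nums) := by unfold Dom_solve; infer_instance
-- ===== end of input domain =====

-- B replaces A's index loop by a divide-and-conquer recursion combining (moves, running max)
-- per half; return value only — A mutates nums in place, B does not.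

-- ===== PORT A =====
-- loop body of 'for i in range(1, N)': state is (res, nums)
def solveStep (s : Int × List Int) (i : Int) : Int × List Int :=
  if PySem.List.pyGetD s.2 i 0 < PySem.List.pyGetD s.2 (i - 1) 0 then
    (s.1 + (PySem.List.pyGetD s.2 (i - 1) 0 - PySem.List.pyGetD s.2 i 0),
     PySem.List.pySetD s.2 i (PySem.List.pyGetD s.2 (i - 1) 0))
  else s

def solve (nums : List Int) : Int :=
  ((PySem.List.pyRange 1 (nums.length : Int) 1).foldl solveStep (0, nums)).1

-- ===== PORT B =====
-- go(m, xs): the nested helper of Source B; len(xs)//2 with len ≥ 0 is Nat division,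
-- xs[:mid]/xs[mid:] with 0 ≤ mid ≤ len are take/drop (PySem.List.slice_to/from_natCast)
def go : Int → List Int → Int × Int
  | m, [] => (0, m)
  | m, [x] => if m > x then (m - x, m) else (0, x)
  | m, x :: y :: rest =>
    let xs := x :: y :: rest
    let mid := xs.length / 2
    let r1 := go m (xs.take mid)
    let r2 := go r1.2 (xs.drop mid)
    (r1.1 + r2.1, r2.2)
termination_by _ xs => xs.length
decreasing_by
  · simp; omega
  · simp; omega

def solve_alt (nums : List Int) : Int :=
  match nums with
  | [] => 0
  | x :: t => (go x t).1     -- go(nums[0], nums[1:])[0]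

-- ===== PRECONDITION & SPEC =====
def Spec_solve (nums : List Int) (out : Int) : Prop := out = solve_alt nums
instance (nums : List Int) (out : Int) : Decidable (Spec_solve nums out) := by unfold Spec_solve; infer_instance

-- ===== CLAIM (what is proved, stated in full; the proofs are below) =====
def Claim_equal_solve : Prop := ∀ (nums : List Int), Dom_solve nums → Spec_solve nums (solve nums)

-- ===== LEMMAS AND PROOFS =====

-- prefix maxima of l continuing from running maximum m
def pm (m : Int) : List Int → List Int
  | [] => []
  | x :: l => max m x :: pm (max m x) l

lemma getD_append_cons (ys : List Int) (x : Int) (l : List Int) :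
    (ys ++ x :: l).getD ys.length 0 = x := by
  simp [List.getD]

lemma A_loop (suf : List Int) : ∀ (pre : List Int) (m res : Int),
    (PySem.List.pyRange ((pre.length : Int) + 1) ((pre.length : Int) + 1 + suf.length) 1).foldl
      solveStep (res, pre ++ m :: suf)
    = (res + ((pm m suf).sum - suf.sum), pre ++ m :: pm m suf) := by
  induction suf with
  | nil => intro pre m res; simp [PySem.List.pyRange_one_eq_nil, pm]
  | cons x suf ih =>
    intro pre m res
    have hcons : PySem.List.pyRange ((pre.length : Int) + 1)
        ((pre.length : Int) + 1 + ((x :: suf).length : Int)) 1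
        = ((pre.length : Int) + 1) :: PySem.List.pyRange ((pre.length : Int) + 1 + 1)
            ((pre.length : Int) + 1 + ((x :: suf).length : Int)) 1 := by
      apply PySem.List.pyRange_one_cons; simp
    have hx : PySem.List.pyGetD (pre ++ m :: x :: suf) ((pre.length : Int) + 1) 0 = x := by
      have hcast : ((pre.length : Int) + 1) = (((pre ++ [m]).length : Nat) : Int) := by simp
      rw [hcast, PySem.List.pyGetD_natCast]
      simp
    have hm : PySem.List.pyGetD (pre ++ m :: x :: suf) ((pre.length : Int) + 1 - 1) 0 = m := by
      have hcast : ((pre.length : Int) + 1 - 1) = ((pre.length : Nat) : Int) := by omega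
      rw [hcast, PySem.List.pyGetD_natCast]
      exact getD_append_cons pre m (x :: suf)
    have hset : PySem.List.pySetD (pre ++ m :: x :: suf) ((pre.length : Int) + 1) m
        = pre ++ m :: m :: suf := by
      have hcast : ((pre.length : Int) + 1) = (((pre ++ [m]).length : Nat) : Int) := by simp
      rw [hcast, PySem.List.pySetD_natCast]
      simp
    have hstep : solveStep (res, pre ++ m :: x :: suf) ((pre.length : Int) + 1)
        = (res + (max m x - x), (pre ++ [m]) ++ max m x :: suf) := by
      simp only [solveStep, hx, hm]
      split_ifs with h
      · rw [hset, max_eq_left h.le]; simp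
      · rw [max_eq_right (by omega)]; simp
    rw [hcons, List.foldl_cons, hstep]
    rw [show (pre.length : Int) + 1 + (((x :: suf).length : Nat) : Int)
          = (pre.length : Int) + 1 + 1 + ((suf.length : Nat) : Int) by simp; ring]
    have hIH := ih (pre ++ [m]) (max m x) (res + (max m x - x))
    have e1 : (((pre ++ [m]).length : Nat) : Int) + 1 = (pre.length : Int) + 1 + 1 := by simp
    rw [e1] at hIH
    rw [hIH]
    simp only [pm, List.sum_cons, List.append_assoc, List.cons_append,
      Prod.mk.injEq]
    exact ⟨by ring, rfl⟩

lemma pm_append (l : List Int) : ∀ (m : Int) (r : List Int),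
    pm m (l ++ r) = pm m l ++ pm (l.foldl max m) r := by
  induction l with
  | nil => intro m r; simp [pm]
  | cons x l ih => intro m r; simp [pm, ih]

-- go m xs = (Σ(prefix maxima) − Σ xs, running maximum after xs)
lemma go_eq (m : Int) (xs : List Int) :
    go m xs = ((pm m xs).sum - xs.sum, xs.foldl max m) := by
  fun_induction go m xs with
  | case1 m => simp [pm]
  | case2 m x h => simp [pm, max_eq_left h.le]
  | case3 m x h =>
    have hx : m ≤ x := by omega
    simp [pm, max_eq_right hx]
  | case4 m x y rest xs mid r1 r2 iha ihb ihc =>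
    clear ihb
    simp only [xs, mid, r1, r2, iha, ihc]
    have hsplit : x :: y :: rest
        = (x :: y :: rest).take ((x :: y :: rest).length / 2)
          ++ (x :: y :: rest).drop ((x :: y :: rest).length / 2) := by simp
    rw [Prod.mk.injEq]
    constructor
    · conv_rhs => rw [hsplit]
      rw [pm_append, List.sum_append, List.sum_append]
      ring
    · conv_rhs => rw [hsplit]
      rw [List.foldl_append]

-- ===== VERDICT (by name: the statement is the Claim_ definition above) =====
theorem solve_spec : Claim_equal_solve := by
  intro nums _
  unfold Spec_solve solve solve_alt
  cases nums with
  | nil => simp [PySem.List.pyRange_one_eq_nil]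
  | cons x t =>
    have hA := A_loop t [] x 0
    simp only [List.length_nil, Nat.cast_zero, zero_add, List.nil_append] at hA
    have hlen : ((x :: t).length : Int) = 1 + t.length := by simp; omega
    rw [hlen, hA]
    simp [go_eq]
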